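-- pv_equiv track=rewrite | github.com/yupenghe/methylpy | methylpy/call_mc_se.py | encode_c_positions
-- ===== SOURCE A (Python) =====
-- def encode_c_positions(seq,is_read2=False):
--     """
--     This function creates an encoding of where cytosine nucleotides are located in a converted read.
--     The encoding uses ascii characters (minus an offset) to indicate an offset into the read.
--     For example, the ascii character # has an integer value of 36 and indicates that a C is located
--     2 bases from the previous position (36 - 34). The offsets build off of one another so if the first
--     offset is 2 and the second offset is 5 the second C is located in the 9th position (since python indexing
--     starts at 0). In other words, next_c_index = prev_c_index + offset + 1.
--
--     seq is a string of nucleotides you'd like to encode.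
--     """
--     indexes = ""
--     prev_index = 0
--     if is_read2==False:
--         index = seq.find("C",prev_index)
--         offset = index + 34
--         while True:
--             if index < 0:
--                 break
--             while offset >= 255:
--                 indexes += chr(255)
--                 offset -= 255
--             if offset < 34:
--                 offset += 34
--             indexes += chr(offset)
--             prev_index = index + 1
--             index = seq.find("C",prev_index)
--             offset = index - prev_index + 34
--     else:
--         index = seq.find("G",prev_index)
--         offset = index + 34
--         while True:
--             if index < 0:
--                 break
--             while offset >= 255:
--                 indexes += chr(255)
--                 offset -= 255
--             if offset < 34:
--                 offset += 34
--             indexes += chr(offset)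
--             prev_index = index + 1
--             index = seq.find("G",prev_index)
--             offset = index - prev_index + 34
--     return indexes
-- ===== SOURCE B (Python) =====
-- def _enc(v):
--     q, r = divmod(v, 255)
--     return chr(255) * q + chr(r if r >= 34 else r + 34)
--
-- def encode_c_positions(seq, is_read2=False):
--     segments = seq.split("C" if is_read2 == False else "G")
--     return "".join(_enc(len(s) + 34) for s in segments[:-1])
-- ===== Notes on version B (the rewrite author's own statement) =====
-- stated objective: simpler
-- what changed: B replaces A's stateful find/prev-index scanning loop (with its duplicated while-True blocks and inner subtract-255 loop) by splitting the string on the target character and statelessly encoding each leading segment's length+34 via divmod, then joining.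
import Mathlib
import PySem

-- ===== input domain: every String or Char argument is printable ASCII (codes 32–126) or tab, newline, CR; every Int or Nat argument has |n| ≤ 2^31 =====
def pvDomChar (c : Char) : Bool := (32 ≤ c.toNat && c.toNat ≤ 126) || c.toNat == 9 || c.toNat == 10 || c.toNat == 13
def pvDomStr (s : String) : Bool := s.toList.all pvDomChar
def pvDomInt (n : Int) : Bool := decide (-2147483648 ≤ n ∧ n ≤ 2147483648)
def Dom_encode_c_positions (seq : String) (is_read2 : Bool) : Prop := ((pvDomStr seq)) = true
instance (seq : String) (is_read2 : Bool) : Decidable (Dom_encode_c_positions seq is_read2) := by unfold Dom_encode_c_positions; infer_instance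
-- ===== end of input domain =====

-- B replaces A's stateful find/prev-index scanning loop by splitting the string on the
-- target character and statelessly encoding each leading segment's length (simpler decomposition).

-- ===== PORT A =====
-- A's inner 'while offset >= 255: indexes += chr(255); offset -= 255' loop, followed by
-- the 'if offset < 34: offset += 34' fix-up and 'indexes += chr(offset)'
def pvEmitA (offset : Int) : List Char :=
  if 255 ≤ offset then
    Char.ofNat 255 :: pvEmitA (offset - 255)
  else
    [Char.ofNat (if offset < 34 then offset + 34 else offset).toNat]
termination_by offset.toNat
decreasing_by omega

-- A's 'while True' loop; fuel only guards totality (prev strictly increases, and the loop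
-- stops as soon as find returns -1, so length + 1 steps always suffice)
def pvALoop (cs : List Char) (t : Char) (prev : Nat) (fuel : Nat) : List Char :=
  match fuel with
  | 0 => []
  | f + 1 =>
    let index := PySem.Chars.findFrom cs [t] (prev : Int)   -- seq.find(t, prev_index)
    if index < 0 then []
    else pvEmitA (index - (prev : Int) + 34) ++ pvALoop cs t (index.toNat + 1) f

def encode_c_positions (seq : String) (is_read2 : Bool) : String :=
  if is_read2 == false then
    String.mk (pvALoop seq.toList 'C' 0 (seq.toList.length + 1))
  else
    String.mk (pvALoop seq.toList 'G' 0 (seq.toList.length + 1))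

-- ===== PORT B =====
-- Source B's _enc(v): q, r = divmod(v, 255); chr(255)*q + chr(r if r >= 34 else r + 34)
def pvEnc (v : Int) : List Char :=
  let q := PySem.Int.floordiv v 255
  let r := PySem.Int.mod v 255
  List.replicate q.toNat (Char.ofNat 255) ++ [Char.ofNat (if 34 ≤ r then r else r + 34).toNat]

-- Source B: segments = seq.split(target); "".join(_enc(len(s)+34) for s in segments[:-1])
-- (segments[:-1] is List.dropLast; str.split with a one-char separator is Chars.splitOn)
def encode_c_positions_alt (seq : String) (is_read2 : Bool) : String :=
  let segments := PySem.Chars.splitOn seq.toList [if is_read2 == false then 'C' else 'G']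
  String.mk ((segments.dropLast.map (fun s => pvEnc ((s.length : Int) + 34))).flatten)

-- ===== PRECONDITION & SPEC =====
def Spec_encode_c_positions (seq : String) (is_read2 : Bool) (out : String) : Prop := out = encode_c_positions_alt seq is_read2
instance (seq : String) (is_read2 : Bool) (out : String) : Decidable (Spec_encode_c_positions seq is_read2 out) := by unfold Spec_encode_c_positions; infer_instance

-- ===== CLAIM (what is proved, stated in full; the proofs are below) =====
def Claim_equal_encode_c_positions : Prop := ∀ (seq : String) (is_read2 : Bool), Dom_encode_c_positions seq is_read2 → Spec_encode_c_positions seq is_read2 (encode_c_positions seq is_read2)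

-- ===== LEMMAS AND PROOFS =====

-- structural characterisation of Chars.splitOn on a single-character separator
def pvSplit1 (t : Char) : List Char → List (List Char)
  | [] => [[]]
  | c :: rest => if c = t then [] :: pvSplit1 t rest else (pvSplit1 t rest).modifyHead (c :: ·)

lemma pvSplit1_ne_nil (t : Char) (l : List Char) : pvSplit1 t l ≠ [] := by
  induction l with
  | nil => simp [pvSplit1]
  | cons c rest ih =>
    simp only [pvSplit1]
    split_ifs
    · simp
    · cases h : pvSplit1 t rest with
      | nil => exact absurd h ih
      | cons b l' => simp [List.modifyHead]

lemma pv_go_eq (t : Char) : ∀ (fuel : Nat) (l cur : List Char) (acc : List (List Char)),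
    l.length ≤ fuel →
    PySem.Chars.splitOn.go [t] fuel l cur acc
      = acc.reverse ++ (pvSplit1 t l).modifyHead (cur.reverse ++ ·) := by
  intro fuel
  induction fuel with
  | zero =>
    intro l cur acc h
    have hl : l = [] := List.eq_nil_of_length_eq_zero (by omega)
    subst hl
    rw [PySem.Chars.splitOn.go.eq_def]
    simp [pvSplit1]
  | succ f ih =>
    intro l cur acc h
    cases l with
    | nil =>
      rw [PySem.Chars.splitOn.go.eq_def]
      simp [pvSplit1]
    | cons c rest =>
      rw [PySem.Chars.splitOn.go.eq_def]
      simp only []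
      by_cases hc : c = t
      · have hpref : [t].isPrefixOf (c :: rest) = true := by
          simp [List.isPrefixOf, hc]
        rw [if_pos hpref]
        simp only [List.length_singleton, List.drop_one, List.tail_cons]
        rw [ih rest [] (cur.reverse :: acc) (by simpa using h)]
        obtain ⟨b, l', hb⟩ := List.exists_cons_of_ne_nil (pvSplit1_ne_nil t rest)
        simp [pvSplit1, hc, hb, List.modifyHead]
      · have hpref : [t].isPrefixOf (c :: rest) = false := by
          simp [List.isPrefixOf]
          exact fun he => absurd he.symm hc
        rw [if_neg (by simp [hpref])]
        rw [ih rest (c :: cur) acc (by simpa using h)]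
        obtain ⟨b, l', hb⟩ := List.exists_cons_of_ne_nil (pvSplit1_ne_nil t rest)
        simp [pvSplit1, hc, hb, List.modifyHead]

lemma pv_splitOn_eq (t : Char) (l : List Char) :
    PySem.Chars.splitOn l [t] = pvSplit1 t l := by
  unfold PySem.Chars.splitOn
  rw [pv_go_eq t (l.length + 1) l [] [] (by omega)]
  obtain ⟨b, l', hb⟩ := List.exists_cons_of_ne_nil (pvSplit1_ne_nil t l)
  simp [hb, List.modifyHead]

lemma pv_singleton_infix (t : Char) (l : List Char) : [t] <:+: l ↔ t ∈ l := by
  constructor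
  · intro h; exact h.subset (List.mem_singleton_self t)
  · intro h
    obtain ⟨s, u, rfl⟩ := List.append_of_mem h
    exact ⟨s, u, by simp⟩

lemma pvSplit1_of_not_mem (t : Char) (l : List Char) (h : t ∉ l) : pvSplit1 t l = [l] := by
  induction l with
  | nil => rfl
  | cons c rest ih =>
    simp only [List.mem_cons, not_or] at h
    rw [pvSplit1, if_neg (fun he => h.1 he.symm), ih h.2]
    rfl

lemma pvSplit1_append (t : Char) (xs ys : List Char) (h : t ∉ xs) :
    pvSplit1 t (xs ++ t :: ys) = xs :: pvSplit1 t ys := by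
  induction xs with
  | nil => simp [pvSplit1]
  | cons c xs ih =>
    simp only [List.mem_cons, not_or] at h
    rw [List.cons_append, pvSplit1, if_neg (fun he => h.1 he.symm), ih h.2]
    rfl

lemma pv_emitA_closed (n : Nat) :
    pvEmitA (n : Int) = List.replicate (n / 255) (Char.ofNat 255)
      ++ (if 34 ≤ n % 255 then [Char.ofNat (n % 255)] else [Char.ofNat (n % 255 + 34)]) := by
  induction n using Nat.strong_induction_on with
  | _ n ih =>
    by_cases h : 255 ≤ n
    · rw [pvEmitA, if_pos (by exact_mod_cast h)]
      have hc : (n : Int) - 255 = ((n - 255 : Nat) : Int) := by omega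
      rw [hc, ih (n - 255) (by omega)]
      have h1 : n / 255 = (n - 255) / 255 + 1 := by omega
      have h2 : n % 255 = (n - 255) % 255 := by omega
      rw [h1, h2, List.replicate_succ]
      simp
    · rw [pvEmitA, if_neg (by exact_mod_cast h)]
      have h0 : n / 255 = 0 := by omega
      have h1 : n % 255 = n := by omega
      rw [h0, h1, List.replicate_zero, List.nil_append]
      by_cases h34 : 34 ≤ n
      · rw [if_pos h34, if_neg (by exact_mod_cast (by omega : ¬ ((n:Int) < 34)))]
        simp
      · rw [if_neg h34, if_pos (by exact_mod_cast (by omega : (n:Int) < 34))]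
        have : ((n:Int) + 34).toNat = n + 34 := by omega
        rw [this]

lemma pv_emit_eq (n : Nat) : pvEmitA (n : Int) = pvEnc (n : Int) := by
  have hq : (PySem.Int.floordiv (n : Int) 255).toNat = n / 255 := by
    rw [show ((255:Int)) = ((255:Nat):Int) from rfl, PySem.Int.floordiv_natCast]
    omega
  have hr : PySem.Int.mod (n : Int) 255 = ((n % 255 : Nat) : Int) := by
    rw [show ((255:Int)) = ((255:Nat):Int) from rfl, PySem.Int.mod_natCast]
  rw [pv_emitA_closed, pvEnc]
  simp only [hq, hr]
  by_cases h34 : 34 ≤ n % 255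
  · rw [if_pos h34, if_pos (by exact_mod_cast h34)]
    congr 2
  · rw [if_neg h34, if_neg (by exact_mod_cast h34)]
    congr 3

lemma pv_loop_eq (cs : List Char) (t : Char) :
    ∀ (fuel prev : Nat), prev ≤ cs.length → cs.length + 1 ≤ fuel + prev →
      pvALoop cs t prev fuel
        = (((pvSplit1 t (cs.drop prev)).dropLast.map
              (fun s => pvEnc ((s.length : Int) + 34))).flatten) := by
  intro fuel
  induction fuel with
  | zero => intro prev h1 h2; omega
  | succ f ih =>
    intro prev h1 h2
    by_cases h : PySem.Chars.findFrom cs [t] (prev : Int) = -1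
    · have hnm : t ∉ cs.drop prev := by
        rw [PySem.Chars.findFrom_natCast_eq_neg_one_iff cs [t] prev h1] at h
        exact fun hm => h ((pv_singleton_infix t _).mpr hm)
      rw [pvALoop, pvSplit1_of_not_mem t _ hnm]
      simp [h]
    · obtain ⟨hge, hpre, hmin⟩ := PySem.Chars.findFrom_natCast_spec cs [t] prev h1 h
      set j := PySem.Chars.findFrom cs [t] (prev : Int) with hj
      obtain ⟨u, hu⟩ := hpre
      have hjlt : j.toNat < cs.length := by
        by_contra hge'
        rw [List.drop_eq_nil_of_le (by omega)] at hu
        simp at hu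
      have hdrop : cs.drop j.toNat = t :: cs.drop (j.toNat + 1) := by
        have htail : u = cs.drop (j.toNat + 1) := by
          have := congrArg List.tail hu
          simpa [List.tail_drop] using this
        rw [← hu, htail]
        rfl
      have hsplitcs : cs.drop prev
          = (cs.drop prev).take (j.toNat - prev) ++ t :: cs.drop (j.toNat + 1) := by
        conv_lhs => rw [← List.take_append_drop (j.toNat - prev) (cs.drop prev)]
        congr 1
        rw [List.drop_drop, show prev + (j.toNat - prev) = j.toNat from by omega, hdrop]
      have hnot : t ∉ (cs.drop prev).take (j.toNat - prev) := by
        intro hmem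
        obtain ⟨i, hi, hival⟩ := List.getElem_of_mem hmem
        have hik : i < j.toNat - prev := by
          have := List.length_take_le (j.toNat - prev) (cs.drop prev)
          omega
        have hibound : prev + i < cs.length := by omega
        have hcsval : cs[prev + i]'hibound = t := by
          rw [List.getElem_take] at hival
          rwa [List.getElem_drop] at hival
        have hpref : [t] <+: cs.drop (prev + i) := by
          rw [List.drop_eq_getElem_cons hibound, hcsval]
          exact ⟨cs.drop (prev + i + 1), rfl⟩
        exact hmin (prev + i) (by omega) (by omega) hpref
      have hlen : ((cs.drop prev).take (j.toNat - prev)).length = j.toNat - prev := by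
        rw [List.length_take]
        simp
        omega
      rw [pvALoop]
      rw [if_neg (by omega : ¬ j < 0)]
      rw [ih (j.toNat + 1) (by omega) (by omega)]
      conv_rhs => rw [hsplitcs, pvSplit1_append t _ _ hnot]
      obtain ⟨b, l', hb⟩ := List.exists_cons_of_ne_nil (pvSplit1_ne_nil t (cs.drop (j.toNat + 1)))
      rw [hb]
      rw [List.dropLast_cons₂, List.map_cons, List.flatten_cons, ← hb]
      have hoff : j - (prev : Int) + 34 = ((j.toNat - prev + 34 : Nat) : Int) := by omega
      rw [hoff, pv_emit_eq]
      congr 2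
      rw [hlen]
      push_cast
      omega

lemma pv_main (cs : List Char) (t : Char) :
    String.mk (pvALoop cs t 0 (cs.length + 1))
      = String.mk (((PySem.Chars.splitOn cs [t]).dropLast.map
          (fun s => pvEnc ((s.length : Int) + 34))).flatten) := by
  rw [pv_splitOn_eq, pv_loop_eq cs t (cs.length + 1) 0 (Nat.zero_le _) (by omega)]
  rfl

-- ===== VERDICT (by name: the statement is the Claim_ definition above) =====
theorem encode_c_positions_spec : Claim_equal_encode_c_positions := by
  intro seq is_read2 _
  unfold Spec_encode_c_positions encode_c_positions encode_c_positions_alt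
  cases is_read2
  · exact pv_main seq.toList 'C'
  · exact pv_main seq.toList 'G'
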